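-- pv_equiv track=rewrite | github.com/AlixPa/AtCoder-fafbaui | beginner/292/C.py | lsOfLsNonUnique
-- ===== SOURCE A (Python) =====
-- def uniquesLs(ls):
--   if len(ls) <= 1:
--     return ls
--   new_ls = list()
--   last  = ls[0]
--   nb_last = 1
--   for k in ls[1:]:
--     if k != last:
--       if nb_last == 1:
--         new_ls.append(last)
--       nb_last = 1
--       last = k
--     else:
--       nb_last += 1
--   if ls[-1] != ls[-2]:
--     new_ls.append(ls[-1])
--   return new_ls
--
-- def lsOfLsNonUnique(ls):
--   ls = ls.copy()
--   uniques_ls = uniquesLs(ls)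
--   for u in uniques_ls:
--     ls.remove(u)
--   if len(ls) == 0:
--     return [list()]
--   ls_of_ls = list()
--   tmp_ls = [ls[0]]
--   last = ls[0]
--   for k in ls[1:]:
--     if k == last:
--       tmp_ls.append(k)
--     else:
--       ls_of_ls.append(tmp_ls)
--       tmp_ls = [k]
--       last = k
--   if len(tmp_ls) > 0:
--     ls_of_ls.append(tmp_ls)
--   return ls_of_ls
-- ===== SOURCE B (Python) =====
-- def lsOfLsNonUnique(ls):
--     n = len(ls)
--     # one linear scan over the runs of consecutive equal elements:
--     # count, per value, how many singleton runs it has (= how many copies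
--     # A's remove-phase deletes; deleting first occurrences is order-free)
--     need = {}
--     i = 0
--     while i < n:
--         j = i + 1
--         while j < n and ls[j] == ls[i]:
--             j += 1
--         if j == i + 1:
--             need[ls[i]] = need.get(ls[i], 0) + 1
--         i = j
--     # keep each element only after its first need[x] occurrences were skipped
--     kept = []
--     for x in ls:
--         if need.get(x, 0) > 0:
--             need[x] -= 1
--         else:
--             kept.append(x)
--     if not kept:
--         return [[]]
--     # group consecutive equal elements of the remainder
--     groups = []
--     k = 0
--     m = len(kept)
--     while k < m:
--         j = k + 1
--         while j < m and kept[j] == kept[k]: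
--             j += 1
--         groups.append(kept[k:j])
--         k = j
--     return groups
-- ===== Notes on version B (the rewrite author's own statement) =====
-- stated objective: faster
-- what changed: A slices the list per element, scans it again for the last-two check, and calls list.remove (a linear scan each) once per singleton run before regrouping; B makes three linear passes: one run scan that counts, per value, how many copies to drop (a dict), one filtered pass that skips exactly those first occurrences, and one grouping pass.
import Mathlib
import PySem

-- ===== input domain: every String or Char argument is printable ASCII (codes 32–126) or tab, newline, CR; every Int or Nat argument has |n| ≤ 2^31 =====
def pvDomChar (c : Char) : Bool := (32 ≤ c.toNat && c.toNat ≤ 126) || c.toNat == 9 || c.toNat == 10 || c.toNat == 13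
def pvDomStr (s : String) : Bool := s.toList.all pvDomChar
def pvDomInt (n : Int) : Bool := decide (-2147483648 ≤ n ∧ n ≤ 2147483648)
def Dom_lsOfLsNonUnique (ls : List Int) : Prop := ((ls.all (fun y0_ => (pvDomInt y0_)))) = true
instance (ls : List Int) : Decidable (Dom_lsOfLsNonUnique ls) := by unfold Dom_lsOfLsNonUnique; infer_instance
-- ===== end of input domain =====

-- B replaces A's quadratic pipeline (repeated list slicing and one list.remove scan per
-- singleton run) by three linear passes: a run scan counting, per value, how many copies
-- to drop, a single filtered pass, and one grouping pass (objective: faster).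

-- ===== PORT A =====
-- loop of uniquesLs over ls[1:]; state (new_ls, last, nb_last)
def pvUniqLoop : List Int → List Int → Int → Int → List Int × Int × Int
  | [], newLs, last, nb => (newLs, last, nb)
  | k :: rest, newLs, last, nb =>
      if k ≠ last then
        pvUniqLoop rest (if nb = 1 then newLs ++ [last] else newLs) k 1
      else
        pvUniqLoop rest newLs last (nb + 1)

-- ls[-1] / ls[-2]: in-range here since the branch runs only when 2 ≤ ls.length
def uniquesLs (ls : List Int) : List Int :=
  if ls.length ≤ 1 then ls
  else
    let st := pvUniqLoop (ls.drop 1) [] ls.headI 1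
    if (PySem.List.pyGet? ls (-1)).getD 0 ≠ (PySem.List.pyGet? ls (-2)).getD 0 then
      st.1 ++ [(PySem.List.pyGet? ls (-1)).getD 0]
    else st.1

-- second loop of lsOfLsNonUnique; state (ls_of_ls, tmp_ls, last)
def pvGroupLoop : List Int → List (List Int) → List Int → Int → List (List Int) × List Int
  | [], acc, tmp, _ => (acc, tmp)
  | k :: rest, acc, tmp, last =>
      if k = last then pvGroupLoop rest acc (tmp ++ [k]) last
      else pvGroupLoop rest (acc ++ [tmp]) [k] k

-- ls.remove(u) never raises here: each u comes from a singleton run of ls, so u is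
-- still present when its removal runs (the getD fallback is never taken)
def lsOfLsNonUnique (ls : List Int) : List (List Int) :=
  let uniques := uniquesLs ls
  let ls2 := uniques.foldl (fun cur u => (PySem.List.remove? cur u).getD cur) ls
  if ls2.length = 0 then [[]]
  else
    let st := pvGroupLoop (ls2.drop 1) [] [ls2.headI] ls2.headI
    if 0 < st.2.length then st.1 ++ [st.2] else st.1

-- ===== PORT B =====
-- first while loop of Source B: scan runs, count singleton runs per value
def pvScanNeed : List Int → PySem.Dict Int Int → PySem.Dict Int Int
  | [], d => d
  | x :: xs, d =>
      pvScanNeed (xs.dropWhile (· == x))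
        (if (xs.takeWhile (· == x)).length = 0 then d.insert x (d.getD x 0 + 1) else d)
  termination_by l _ => l.length
  decreasing_by simpa using Nat.lt_succ_of_le (List.length_dropWhile_le _ _)

-- for loop of Source B: keep x only once its first need[x] occurrences were skipped
def pvKeep : List Int → PySem.Dict Int Int → List Int
  | [], _ => []
  | x :: xs, d =>
      if 0 < d.getD x 0 then pvKeep xs (d.insert x (d.getD x 0 - 1))
      else x :: pvKeep xs d

-- last while loop of Source B: group consecutive equal elements (kept[k:j] = x :: run)
def pvGroups : List Int → List (List Int)
  | [] => []
  | x :: xs => (x :: xs.takeWhile (· == x)) :: pvGroups (xs.dropWhile (· == x))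
  termination_by l => l.length
  decreasing_by simpa using Nat.lt_succ_of_le (List.length_dropWhile_le _ _)

def lsOfLsNonUnique_alt (ls : List Int) : List (List Int) :=
  let kept := pvKeep ls (pvScanNeed ls PySem.Dict.empty)
  if kept = [] then [[]] else pvGroups kept

-- ===== PRECONDITION & SPEC =====
def Spec_lsOfLsNonUnique (ls : List Int) (out : List (List Int)) : Prop := out = lsOfLsNonUnique_alt ls
instance (ls : List Int) (out : List (List Int)) : Decidable (Spec_lsOfLsNonUnique ls out) := by unfold Spec_lsOfLsNonUnique; infer_instance

-- ===== CLAIM (what is proved, stated in full; the proofs are below) =====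
def Claim_equal_lsOfLsNonUnique : Prop := ∀ (ls : List Int), Dom_lsOfLsNonUnique ls → Spec_lsOfLsNonUnique ls (lsOfLsNonUnique ls)

-- ===== LEMMAS AND PROOFS =====

-- the singleton-run values of l, in order (what uniquesLs computes)
def pvSingRs (rs : List (List Int)) : List Int := (rs.filter (fun r => r.length == 1)).map (fun r => r.headI)
def pvSing (l : List Int) : List Int := pvSingRs (pvGroups l)
-- last run of l
def pvLastRun (l : List Int) : List Int := ((pvGroups l).getLast?).getD []

-- pure view of pvKeep: the counter dict as a function
def pvKeepF : List Int → (Int → Int) → List Int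
  | [], _ => []
  | x :: xs, c =>
      if 0 < c x then pvKeepF xs (fun v => if v = x then c v - 1 else c v)
      else x :: pvKeepF xs c

theorem pv_head?_dropWhile {p : Int → Bool} {l : List Int} {y : Int}
    (h : (l.dropWhile p).head? = some y) : p y = false := by
  induction l with
  | nil => simp at h
  | cons a t ih =>
    by_cases hp : p a
    · rw [List.dropWhile_cons_of_pos hp] at h; exact ih h
    · rw [List.dropWhile_cons_of_neg hp] at h; simp at h; subst h; simpa using hp

theorem pv_takeWhile_mem {l : List Int} {x y : Int} (hy : y ∈ l.takeWhile (· == x)) : y = x := by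
  simpa using List.mem_takeWhile_imp hy

theorem pv_dropWhile_head {l : List Int} {x y : Int}
    (hy : (l.dropWhile (· == x)).head? = some y) : y ≠ x := by
  have := pv_head?_dropWhile hy
  simpa using this

theorem pvGroups_ne_nil {l : List Int} (h : l ≠ []) : pvGroups l ≠ [] := by
  cases l with
  | nil => exact absurd rfl h
  | cons x xs => simp [pvGroups]

theorem pv_getLast?_cons_of_ne_nil {a : List Int} {l : List (List Int)} (h : l ≠ []) :
    (a :: l).getLast? = l.getLast? := by
  cases l with
  | nil => exact absurd rfl h
  | cons b t => exact List.getLast?_cons_cons ..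

theorem pv_const_getLast? {l : List Int} {x : Int} (h : ∀ y ∈ l, y = x) (hne : l ≠ []) :
    l.getLast? = some x := by
  rw [List.getLast?_eq_some_getLast hne]  -- placeholder, fixed below if name differs
  exact congrArg some (h _ (List.getLast_mem hne))

theorem pv_const_getElem? {l : List Int} {x : Int} (h : ∀ y ∈ l, y = x) {i : Nat}
    (hi : i < l.length) : l[i]? = some x := by
  rw [List.getElem?_eq_getElem hi]
  exact congrArg some (h _ (List.getElem_mem hi))

-- splitting the singleton-run values at the last run
theorem pvSingRs_split_last (rs : List (List Int)) (h : rs ≠ []) :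
    pvSingRs rs = pvSingRs rs.dropLast
      ++ (if ((rs.getLast?).getD []).length = 1 then [((rs.getLast?).getD []).headI] else []) := by
  conv_lhs => rw [← List.dropLast_concat_getLast h]
  rw [List.getLast?_eq_some_getLast h]
  simp only [Option.getD_some]
  unfold pvSingRs
  rw [List.filter_append, List.map_append]
  congr 1
  by_cases hl : (rs.getLast h).length = 1
  · simp [hl]
  · simp [hl]

-- (1) pvUniqLoop swallows a constant block, only bumping the counter
theorem pvUniqLoop_const (t : List Int) (r : List Int) (nl : List Int) (x : Int) (nb : Int)
    (ht : ∀ y ∈ t, y = x) :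
    pvUniqLoop (t ++ r) nl x nb = pvUniqLoop r nl x (nb + t.length) := by
  induction t generalizing nb with
  | nil => simp
  | cons a t ih =>
    have ha : a = x := ht a (by simp)
    subst ha
    simp only [List.cons_append, pvUniqLoop, ne_eq, not_true_eq_false, ite_false]
    rw [ih (nb + 1) (fun y hy => ht y (List.mem_cons_of_mem _ hy))]
    congr 1
    simp only [List.length_cons]
    push_cast
    omega

-- (2) pvUniqLoop on a nonempty list whose head differs from the current value
theorem pvUniqLoop_main (l : List Int) (nl : List Int) (c : Int) (nb : Int)
    (hne : l ≠ []) (hh : ∀ y, l.head? = some y → y ≠ c) :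
    pvUniqLoop l nl c nb =
      (nl ++ (if nb = 1 then [c] else []) ++ pvSingRs ((pvGroups l).dropLast),
       (pvLastRun l).headI, ((pvLastRun l).length : Int)) := by
  induction l using pvGroups.induct generalizing nl c nb with
  | case1 => exact absurd rfl hne
  | case2 x xs ih =>
    have hxc : x ≠ c := hh x rfl
    simp only [pvUniqLoop, ne_eq, hxc, not_false_eq_true, if_pos]
    conv_lhs => rw [show xs = xs.takeWhile (· == x) ++ xs.dropWhile (· == x) from
      (List.takeWhile_append_dropWhile ..).symm]
    rw [pvUniqLoop_const _ _ _ _ _ (fun y hy => pv_takeWhile_mem hy)]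
    by_cases hdw : xs.dropWhile (· == x) = []
    · rw [hdw, pvUniqLoop]
      have hgr : pvGroups (x :: xs) = [x :: xs.takeWhile (· == x)] := by
        simp [pvGroups, hdw]
      by_cases hb : nb = 1 <;>
        simp [pvLastRun, hgr, pvSingRs, hb, List.headI] <;> omega
    · rw [ih (if nb = 1 then nl ++ [c] else nl) x
        (1 + ((xs.takeWhile (· == x)).length : Int)) hdw
        (fun y hy => pv_dropWhile_head hy)]
      have hgr : pvGroups (x :: xs)
          = (x :: xs.takeWhile (· == x)) :: pvGroups (xs.dropWhile (· == x)) := by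
        simp [pvGroups]
      have hgne : pvGroups (xs.dropWhile (· == x)) ≠ [] := pvGroups_ne_nil hdw
      simp only [pvLastRun, hgr]
      rw [pv_getLast?_cons_of_ne_nil hgne, List.dropLast_cons_of_ne_nil hgne]
      by_cases ht : (xs.takeWhile (· == x)).length = 0 <;> by_cases hb : nb = 1 <;>
        simp [pvSingRs, ht, hb]

theorem pv_last_char (l : List Int) (h : 2 ≤ l.length) :
    (PySem.List.pyGet? l (-1)).getD 0 = (pvLastRun l).headI ∧
      ((PySem.List.pyGet? l (-1)).getD 0 ≠ (PySem.List.pyGet? l (-2)).getD 0 ↔ (pvLastRun l).length = 1) := by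
  induction l using pvGroups.induct with
  | case1 => simp at h
  | case2 x xs ih =>
    by_cases hdw : xs.dropWhile (· == x) = []
    · -- the whole list is one constant run
      have hxs : xs = xs.takeWhile (· == x) := by
        conv_lhs => rw [← List.takeWhile_append_dropWhile (p := (· == x)) (l := xs)]
        rw [hdw, List.append_nil]
      have hall : ∀ y ∈ x :: xs, y = x := by
        intro y hy
        rcases List.mem_cons.mp hy with h1 | h1
        · exact h1
        · exact pv_takeWhile_mem (hxs ▸ h1)
      have h1 : PySem.List.pyGet? (x :: xs) (-1) = some x := by
        rw [PySem.List.pyGet?_neg_one]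
        exact pv_const_getLast? hall (by simp)
      have h2 : PySem.List.pyGet? (x :: xs) (-2) = some x := by
        rw [PySem.List.pyGet?_neg_ofNat _ 2 (by omega) (by omega)]
        exact pv_const_getElem? hall (by simp only [List.length_cons] at h ⊢; omega)
      have hgr : pvGroups (x :: xs) = [x :: xs.takeWhile (· == x)] := by
        simp [pvGroups, hdw]
      rw [h1, h2, pvLastRun, hgr]
      simp only [List.getLast?_singleton, Option.getD_some, Option.getD_some]
      refine ⟨by rw [List.headI], ?_⟩
      simp only [ne_eq, not_true_eq_false, false_iff]
      have : xs.length = (xs.takeWhile (· == x)).length := by rw [← hxs]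
      simp only [List.length_cons] at h ⊢
      omega
    · have hgr : pvGroups (x :: xs)
          = (x :: xs.takeWhile (· == x)) :: pvGroups (xs.dropWhile (· == x)) := by
        simp [pvGroups]
      have hgne : pvGroups (xs.dropWhile (· == x)) ≠ [] := pvGroups_ne_nil hdw
      have hlr : pvLastRun (x :: xs) = pvLastRun (xs.dropWhile (· == x)) := by
        rw [pvLastRun, hgr, pv_getLast?_cons_of_ne_nil hgne, pvLastRun]
      have hsplitxs : x :: xs = (x :: xs.takeWhile (· == x)) ++ xs.dropWhile (· == x) := by
        simp [List.takeWhile_append_dropWhile]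
      rcases Nat.lt_or_ge (xs.dropWhile (· == x)).length 2 with hsmall | hbig
      · -- the last run is a lone element y
        have hone : (xs.dropWhile (· == x)).length = 1 := by
          rcases Nat.eq_or_lt_of_le (Nat.one_le_iff_ne_zero.mpr
            (fun h0 => hdw (List.eq_nil_of_length_eq_zero h0))) with h1 | h1
          · omega
          · omega
        obtain ⟨y, hy⟩ : ∃ y, xs.dropWhile (· == x) = [y] :=
          List.length_eq_one_iff.mp hone
        have hyx : y ≠ x := pv_dropWhile_head (by rw [hy]; rfl)
        have h1 : PySem.List.pyGet? (x :: xs) (-1) = some y := by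
          rw [show x :: xs = (x :: xs.takeWhile (· == x)) ++ [y] from by
            rw [hsplitxs, hy]]
          exact PySem.List.pyGet?_neg_one_append_singleton ..
        have h2 : PySem.List.pyGet? (x :: xs) (-2) = some x := by
          rw [PySem.List.pyGet?_neg_ofNat _ 2 (by omega) (by omega)]
          rw [hsplitxs, hy]
          have hlen : ((x :: xs.takeWhile (· == x)) ++ [y]).length
              = (x :: xs.takeWhile (· == x)).length + 1 := by
            simp only [List.length_append, List.length_cons, List.length_nil]
          rw [hlen]
          have hidx : (x :: xs.takeWhile (· == x)).length + 1 - 2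
              = (x :: xs.takeWhile (· == x)).length - 1 := by omega
          rw [hidx, List.getElem?_append_left (by simp)]
          exact pv_const_getElem? (fun z hz => by
            rcases List.mem_cons.mp hz with h1 | h1
            · exact h1
            · exact pv_takeWhile_mem h1) (by simp)
        rw [h1, h2, hlr, hy]
        constructor
        · simp [pvLastRun, pvGroups, List.headI]
        · simp [pvLastRun, pvGroups, hyx]
      · -- the last two elements lie inside the tail part
        have hsub : ∀ k : Nat, 0 < k → k ≤ 2 →
            PySem.List.pyGet? (x :: xs) (-(k : Int))
              = PySem.List.pyGet? (xs.dropWhile (· == x)) (-(k : Int)) := by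
          intro k hk hk2
          rw [PySem.List.pyGet?_neg_natCast (x :: xs) k (by omega) (by omega),
            PySem.List.pyGet?_neg_natCast (xs.dropWhile (· == x)) k (by omega) (by omega)]
          rw [hsplitxs]
          have hlen : ((x :: xs.takeWhile (· == x)) ++ xs.dropWhile (· == x)).length
              = (x :: xs.takeWhile (· == x)).length + (xs.dropWhile (· == x)).length :=
            List.length_append ..
          rw [hlen]
          have hidx : (x :: xs.takeWhile (· == x)).length + (xs.dropWhile (· == x)).length - k
              = (x :: xs.takeWhile (· == x)).length + ((xs.dropWhile (· == x)).length - k) := by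
            omega
          rw [hidx, List.getElem?_append_right (by omega)]
          congr 1
          omega
        have h1 := hsub 1 (by omega) (by omega)
        have h2 := hsub 2 (by omega) (by omega)
        norm_num at h1 h2
        rw [h1, h2, hlr]
        exact ih hbig

theorem pvSing_cons (x : Int) (xs : List Int) :
    pvSing (x :: xs)
      = (if (xs.takeWhile (· == x)).length = 0 then [x] else [])
        ++ pvSing (xs.dropWhile (· == x)) := by
  simp only [pvSing, pvGroups, pvSingRs, List.filter_cons]
  by_cases ht : (xs.takeWhile (· == x)).length = 0
  · simp [ht]
  · rw [if_neg (by simpa using ht)]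
    simp [ht]

-- (3) uniquesLs computes exactly the singleton-run values
theorem uniquesLs_eq_pvSing (ls : List Int) : uniquesLs ls = pvSing ls := by
  rcases ls with _ | ⟨x, xs⟩
  · simp [uniquesLs, pvSing, pvGroups, pvSingRs]
  rcases hxs0 : xs with _ | ⟨y, t⟩
  · simp [uniquesLs, pvSing, pvGroups, pvSingRs, List.headI]
  rw [← hxs0]
  have hxsne : xs ≠ [] := by rw [hxs0]; simp
  have hlen2 : 2 ≤ (x :: xs).length := by rw [hxs0]; simp only [List.length_cons]; omega
  clear hxs0
  unfold uniquesLs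
  rw [if_neg (by simp only [List.length_cons] at hlen2 ⊢; omega)]
  simp only [List.drop_one, List.tail_cons, List.headI]
  have hstep : pvUniqLoop xs [] x 1
      = pvUniqLoop (xs.dropWhile (· == x)) [] x (1 + ((xs.takeWhile (· == x)).length : Int)) := by
    conv_lhs => rw [show xs = xs.takeWhile (· == x) ++ xs.dropWhile (· == x) from
      (List.takeWhile_append_dropWhile ..).symm]
    exact pvUniqLoop_const _ _ _ _ _ (fun z hz => pv_takeWhile_mem hz)
  rw [hstep]
  obtain ⟨hget1, hcond⟩ := pv_last_char (x :: xs) hlen2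
  by_cases hdw : xs.dropWhile (· == x) = []
  · rw [hdw, pvUniqLoop]
    have htw : xs.takeWhile (· == x) = xs := by
      conv_rhs => rw [← List.takeWhile_append_dropWhile (p := (· == x)) (l := xs)]
      rw [hdw, List.append_nil]
    have hgr : pvGroups (x :: xs) = [x :: xs.takeWhile (· == x)] := by
      simp [pvGroups, hdw]
    have hxlen : (pvLastRun (x :: xs)).length ≠ 1 := by
      rw [pvLastRun, hgr]
      simp [htw, List.length_eq_zero_iff, hxsne]
    rw [if_neg (fun hc => hxlen (hcond.mp hc))]
    simp [pvSing, hgr, pvSingRs, htw, List.length_eq_zero_iff, hxsne]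
  · rw [pvUniqLoop_main _ _ x _ hdw (fun z hz => pv_dropWhile_head hz)]
    have hgr : pvGroups (x :: xs)
        = (x :: xs.takeWhile (· == x)) :: pvGroups (xs.dropWhile (· == x)) := by
      simp [pvGroups]
    have hgne : pvGroups (xs.dropWhile (· == x)) ≠ [] := pvGroups_ne_nil hdw
    have hlr : pvLastRun (x :: xs) = pvLastRun (xs.dropWhile (· == x)) := by
      rw [pvLastRun, hgr, pv_getLast?_cons_of_ne_nil hgne, pvLastRun]
    have hsplit2 : pvSing (xs.dropWhile (· == x))
        = pvSingRs ((pvGroups (xs.dropWhile (· == x))).dropLast)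
          ++ (if (pvLastRun (xs.dropWhile (· == x))).length = 1
              then [(pvLastRun (xs.dropWhile (· == x))).headI] else []) := by
      have := pvSingRs_split_last (pvGroups (xs.dropWhile (· == x))) hgne
      exact this
    by_cases hloo : (pvLastRun (xs.dropWhile (· == x))).length = 1
    · rw [if_pos (hcond.mpr (by rw [hlr]; exact hloo)), hget1, hlr, pvSing_cons,
        hsplit2, if_pos hloo]
      by_cases ht : (xs.takeWhile (· == x)).length = 0 <;> simp [ht]
    · rw [if_neg (fun hc => hloo (by have := hcond.mp hc; rwa [hlr] at this)),
        pvSing_cons, hsplit2, if_neg hloo]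
      by_cases ht : (xs.takeWhile (· == x)).length = 0 <;> simp [ht]

-- (4) the need dict is a counter of the singleton-run values
theorem pvScanNeed_getD (l : List Int) (d : PySem.Dict Int Int) (v : Int) :
    (pvScanNeed l d).getD v 0 = d.getD v 0 + ((pvSing l).count v : Int) := by
  induction l using pvGroups.induct generalizing d with
  | case1 => simp [pvScanNeed, pvSing, pvGroups, pvSingRs]
  | case2 x xs ih =>
    rw [pvScanNeed, ih]
    have hsing : pvSing (x :: xs)
        = (if (xs.takeWhile (· == x)).length = 0 then [x] else [])
          ++ pvSing (xs.dropWhile (· == x)) := by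
      simp only [pvSing, pvGroups, pvSingRs, List.filter_cons]
      by_cases ht : (xs.takeWhile (· == x)).length = 0
      · simp [ht]
      · rw [if_neg (by simpa using ht)]
        simp [ht]
    rw [hsing, List.count_append]
    by_cases ht : (xs.takeWhile (· == x)).length = 0
    · rw [if_pos ht, if_pos ht]
      by_cases hvx : v = x
      · subst hvx
        simp
        omega
      · have hb : (x == v) = false := by simp [Ne.symm hvx]
        simp [PySem.Dict.getD_insert, hvx, List.count_cons, hb]
    · rw [if_neg ht, if_neg ht]
      simp

-- (5) pvKeep only reads the dict through getD
theorem pvKeep_eq_pvKeepF (xs : List Int) (d : PySem.Dict Int Int) :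
    pvKeep xs d = pvKeepF xs (fun v => d.getD v 0) := by
  induction xs generalizing d with
  | nil => simp [pvKeep, pvKeepF]
  | cons x t ih =>
    simp only [pvKeep, pvKeepF]
    by_cases hx : 0 < d.getD x 0
    · rw [if_pos hx, if_pos hx, ih]
      congr 1
      funext v
      by_cases hv : v = x
      · subst hv; simp
      · simp [PySem.Dict.getD_insert, hv]
    · rw [if_neg hx, if_neg hx, ih]

theorem pvKeepF_zero (l : List Int) (c : Int → Int) (hc : ∀ v, c v = 0) : pvKeepF l c = l := by
  induction l generalizing c with
  | nil => simp [pvKeepF]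
  | cons x xs ih =>
    rw [pvKeepF, if_neg (by simp [hc]), ih c hc]

-- (8) removing the first occurrence of u = bumping u's skip budget by one
theorem pvKeepF_erase (l : List Int) (c : Int → Int) (u : Int) (hu : u ∈ l) (hc : ∀ v, 0 ≤ c v) :
    pvKeepF l (fun v => c v + if v = u then 1 else 0) = pvKeepF (l.erase u) c := by
  induction l generalizing c with
  | nil => simp at hu
  | cons x t ih =>
    by_cases hx : x = u
    · subst hx
      rw [List.erase_cons_head]
      simp only [pvKeepF]
      simp only [if_true]
      rw [if_pos (show 0 < c x + 1 by have := hc x; omega)]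
      congr 1
      funext v
      by_cases hv : v = x <;> simp [hv]
    · have hxu : (x == u) = false := by simp [hx]
      rw [List.erase_cons_tail (by simp [hx])]
      have hut : u ∈ t := by
        rcases List.mem_cons.mp hu with h | h
        · exact absurd h.symm hx
        · exact h
      simp only [pvKeepF]
      have hself : (c x + if x = u then (1 : Int) else 0) = c x := by simp [hx]
      rw [hself]
      by_cases hcx : 0 < c x
      · rw [if_pos hcx, if_pos hcx]
        rw [← ih (fun v => if v = x then c v - 1 else c v) hut ?hge]
        case hge =>
          intro v
          by_cases hv : v = x
          · subst hv; simp only [if_true]; omega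
          · simp only [if_neg hv]; exact hc v
        congr 1
        funext v
        by_cases hv : v = x
        · subst hv; simp [hx]
        · simp [hv]
      · rw [if_neg hcx, if_neg hcx, ih c hut hc]

-- (9) the remove loop = one filtered pass driven by counts
theorem pv_removal (U : List Int) (l : List Int) (hcnt : ∀ v, U.count v ≤ l.count v) :
    U.foldl (fun cur u => (PySem.List.remove? cur u).getD cur) l
      = pvKeepF l (fun v => (U.count v : Int)) := by
  induction U generalizing l with
  | nil =>
    simp only [List.foldl_nil]
    rw [pvKeepF_zero l _ (by simp)]
  | cons u U ih =>
    have hul : u ∈ l := by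
      have h1 : 1 ≤ (u :: U).count u := by simp
      have := hcnt u
      exact List.count_pos_iff.mp (by omega)
    rw [List.foldl_cons, PySem.List.remove?_eq_some_erase l u hul]
    simp only [Option.getD_some]
    rw [ih (l.erase u) ?hc]
    case hc =>
      intro v
      rw [List.count_erase]
      have hv := hcnt v
      rw [List.count_cons] at hv
      by_cases hvu : v = u
      · subst hvu; simp at hv ⊢; omega
      · have h2 : (u == v) = false := by simp [Ne.symm hvu]
        simp [h2] at hv ⊢; omega
    rw [← pvKeepF_erase l _ u hul (by intro v; positivity)]
    congr 1
    funext v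
    rw [List.count_cons]
    by_cases hv : v = u
    · subst hv; simp
    · have h2 : (u == v) = false := by simp [Ne.symm hv]
      simp [h2, hv]

-- (10) there are at least as many copies of v as singleton runs of v
theorem pvSing_count_le (ls : List Int) (v : Int) : (pvSing ls).count v ≤ ls.count v := by
  induction ls using pvGroups.induct with
  | case1 => simp [pvSing, pvGroups, pvSingRs]
  | case2 x xs ih =>
    have hsing : pvSing (x :: xs)
        = (if (xs.takeWhile (· == x)).length = 0 then [x] else [])
          ++ pvSing (xs.dropWhile (· == x)) := by
      simp only [pvSing, pvGroups, pvSingRs, List.filter_cons]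
      by_cases ht : (xs.takeWhile (· == x)).length = 0
      · simp [ht]
      · rw [if_neg (by simpa using ht)]
        simp [ht]
    have hsplit : xs.count v
        = (xs.takeWhile (· == x)).count v + (xs.dropWhile (· == x)).count v := by
      conv_lhs => rw [← List.takeWhile_append_dropWhile (p := (· == x)) (l := xs)]
      exact List.count_append ..
    rw [hsing, List.count_append, List.count_cons]
    by_cases hxv : x = v
    · subst hxv
      by_cases ht : (xs.takeWhile (· == x)).length = 0 <;> simp [ht] <;> omega
    · have hb : (x == v) = false := by simp [hxv]
      by_cases ht : (xs.takeWhile (· == x)).length = 0 <;> simp [ht, hb, hxv] <;> omega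

-- (11a) pvGroupLoop swallows a block equal to the current value into tmp
theorem pvGroupLoop_const (l : List Int) (acc : List (List Int)) (tmp : List Int) (c : Int) :
    pvGroupLoop l acc tmp c
      = pvGroupLoop (l.dropWhile (· == c)) acc (tmp ++ l.takeWhile (· == c)) c := by
  induction l generalizing tmp with
  | nil => simp
  | cons a t ih =>
    by_cases ha : a = c
    · subst ha
      rw [List.takeWhile_cons_of_pos (by simp), List.dropWhile_cons_of_pos (by simp)]
      simp only [pvGroupLoop, if_true]
      rw [ih (tmp ++ [a])]
      simp
    · rw [List.takeWhile_cons_of_neg (by simp [ha]), List.dropWhile_cons_of_neg (by simp [ha])]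
      simp

-- (11b) finished pvGroupLoop emits the runs
theorem pvGroupLoop_main (l : List Int) (acc : List (List Int)) (tmp : List Int) (c : Int)
    (htmp : tmp ≠ []) (hh : ∀ y, l.head? = some y → y ≠ c) :
    (if 0 < (pvGroupLoop l acc tmp c).2.length
      then (pvGroupLoop l acc tmp c).1 ++ [(pvGroupLoop l acc tmp c).2]
      else (pvGroupLoop l acc tmp c).1)
      = acc ++ [tmp] ++ pvGroups l := by
  induction l using pvGroups.induct generalizing acc tmp c with
  | case1 =>
    simp only [pvGroupLoop, pvGroups, List.append_nil]
    rw [if_pos (by cases tmp with | nil => exact absurd rfl htmp | cons a b => simp)]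
  | case2 x xs ih =>
    have hxc : x ≠ c := hh x rfl
    simp only [pvGroupLoop, if_neg hxc]
    rw [pvGroupLoop_const xs (acc ++ [tmp]) [x] x]
    rw [ih (acc ++ [tmp]) ([x] ++ xs.takeWhile (· == x)) x (by simp)
      (fun y hy => pv_dropWhile_head hy)]
    simp [pvGroups]

theorem pv_main (ls : List Int) : lsOfLsNonUnique ls = lsOfLsNonUnique_alt ls := by
  simp only [lsOfLsNonUnique, lsOfLsNonUnique_alt]
  have hkept : (uniquesLs ls).foldl (fun cur u => (PySem.List.remove? cur u).getD cur) ls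
      = pvKeep ls (pvScanNeed ls PySem.Dict.empty) := by
    rw [uniquesLs_eq_pvSing, pv_removal _ _ (fun v => pvSing_count_le ls v),
      pvKeep_eq_pvKeepF]
    congr 1
    funext v
    rw [pvScanNeed_getD]
    simp
  rw [hkept]
  by_cases hkne : pvKeep ls (pvScanNeed ls PySem.Dict.empty) = []
  · rw [hkne]
    simp
  · obtain ⟨k, kr, hke⟩ : ∃ k kr, pvKeep ls (pvScanNeed ls PySem.Dict.empty) = k :: kr := by
      rcases hp : pvKeep ls (pvScanNeed ls PySem.Dict.empty) with _ | ⟨k, kr⟩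
      · exact absurd hp hkne
      · exact ⟨k, kr, rfl⟩
    rw [hke]
    rw [if_neg (show ¬(k :: kr : List Int).length = 0 by simp),
      if_neg (show ¬(k :: kr : List Int) = [] by simp)]
    simp only [List.drop_one, List.tail_cons, List.headI]
    rw [pvGroupLoop_const kr [] [k] k]
    rw [pvGroupLoop_main (kr.dropWhile (· == k)) [] ([k] ++ kr.takeWhile (· == k)) k
      (by simp) (fun z hz => pv_dropWhile_head hz)]
    simp [pvGroups]

-- ===== VERDICT (by name: the statement is the Claim_ definition above) =====
theorem lsOfLsNonUnique_spec : Claim_equal_lsOfLsNonUnique := by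
  intro ls _
  unfold Spec_lsOfLsNonUnique
  exact pv_main ls
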